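-- pv_equiv track=rewrite | github.com/CongLabCode/DPAM | docker/scripts/step21_compare_domains.py | get_seq_dist
-- ===== SOURCE A (Python) =====
-- def get_seq_dist(residsA, residsB, good_resids):
--     indsA = []
--     for ind, resid in enumerate(good_resids):
--         if resid in residsA:
--             indsA.append(ind)
--     indsB = []
--     for ind, resid in enumerate(good_resids):
--         if resid in residsB:
--             indsB.append(ind)
--
--     connected = 0
--     for indA in indsA:
--         for indB in indsB:
--             if abs(indA - indB) <= 5:
--                 connected = 1
--                 break
--         if connected:
--             break
--     return connected
-- ===== SOURCE B (Python) =====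
-- def get_seq_dist(residsA, residsB, good_resids):
--     setA = set(residsA)
--     setB = set(residsB)
--     idxB = {ind for ind, resid in enumerate(good_resids) if resid in setB}
--     for ind, resid in enumerate(good_resids):
--         if resid in setA:
--             for j in range(ind - 5, ind + 6):
--                 if j in idxB:
--                     return 1
--     return 0
-- ===== Notes on version B (the rewrite author's own statement) =====
-- stated objective: faster
-- what changed: Instead of building both index lists and comparing every A-index against every B-index, B hashes the residue lists into sets, collects the B-positions into one set, and checks an 11-wide index window around each A-position.
import Mathlib
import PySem

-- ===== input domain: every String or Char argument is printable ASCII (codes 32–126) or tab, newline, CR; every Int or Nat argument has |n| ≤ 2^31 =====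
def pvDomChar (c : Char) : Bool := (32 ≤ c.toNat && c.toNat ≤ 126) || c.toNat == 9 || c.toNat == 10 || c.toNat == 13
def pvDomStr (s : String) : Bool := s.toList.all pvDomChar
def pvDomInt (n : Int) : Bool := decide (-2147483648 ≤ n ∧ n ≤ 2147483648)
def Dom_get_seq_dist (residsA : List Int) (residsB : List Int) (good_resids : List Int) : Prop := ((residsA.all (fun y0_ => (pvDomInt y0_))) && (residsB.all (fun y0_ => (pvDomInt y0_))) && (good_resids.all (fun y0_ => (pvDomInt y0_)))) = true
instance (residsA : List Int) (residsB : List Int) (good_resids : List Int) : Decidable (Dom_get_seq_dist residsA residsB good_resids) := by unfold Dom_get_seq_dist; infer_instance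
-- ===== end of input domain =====

-- B replaces A's index-list construction and nested pairwise scan by residue sets,
-- one set of B-positions, and an 11-wide index-window check per A-position (faster).

-- ===== PORT A =====
-- inner 'for indB in indsB: if abs(...) <= 5: connected = 1; break'
def pvInnerA (indA : Int) : List Int → Bool
  | [] => false
  | indB :: rest => if (indA - indB).natAbs ≤ 5 then true else pvInnerA indA rest

-- outer 'for indA in indsA: …; if connected: break'
def pvOuterA : List Int → List Int → Int
  | [], _ => 0
  | indA :: rest, indsB => if pvInnerA indA indsB then 1 else pvOuterA rest indsB

def get_seq_dist (residsA : List Int) (residsB : List Int) (good_resids : List Int) : Int :=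
  let indsA := (PySem.List.enumerate good_resids 0).foldl
    (fun acc p => if residsA.contains p.2 then acc ++ [p.1] else acc) []
  let indsB := (PySem.List.enumerate good_resids 0).foldl
    (fun acc p => if residsB.contains p.2 then acc ++ [p.1] else acc) []
  pvOuterA indsA indsB

-- ===== PORT B =====
-- 'for ind, resid in enumerate(good_resids): if resid in setA: if any window index in idxB: return 1'
def pvScanB (setA : PySem.Set Int) (idxB : PySem.Set Int) : List (Int × Int) → Int
  | [] => 0
  | p :: rest =>
    if PySem.Set.contains setA p.2 &&
       (PySem.List.pyRange (p.1 - 5) (p.1 + 6) 1).any (fun j => PySem.Set.contains idxB j)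
    then 1 else pvScanB setA idxB rest

def get_seq_dist_alt (residsA : List Int) (residsB : List Int) (good_resids : List Int) : Int :=
  let setA := PySem.Set.ofList residsA
  let setB := PySem.Set.ofList residsB
  let idxB := (PySem.List.enumerate good_resids 0).foldl
    (fun s p => if PySem.Set.contains setB p.2 then PySem.Set.add s p.1 else s) PySem.Set.empty
  pvScanB setA idxB (PySem.List.enumerate good_resids 0)

-- ===== PRECONDITION & SPEC =====
def Spec_get_seq_dist (residsA : List Int) (residsB : List Int) (good_resids : List Int) (out : Int) : Prop := out = get_seq_dist_alt residsA residsB good_resids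
instance (residsA : List Int) (residsB : List Int) (good_resids : List Int) (out : Int) : Decidable (Spec_get_seq_dist residsA residsB good_resids out) := by unfold Spec_get_seq_dist; infer_instance

-- ===== CLAIM (what is proved, stated in full; the proofs are below) =====
def Claim_equal_get_seq_dist : Prop := ∀ (residsA : List Int) (residsB : List Int) (good_resids : List Int), Dom_get_seq_dist residsA residsB good_resids → Spec_get_seq_dist residsA residsB good_resids (get_seq_dist residsA residsB good_resids)

-- ===== LEMMAS AND PROOFS =====

theorem pvInnerA_eq_true_iff (a : Int) (bs : List Int) :
    pvInnerA a bs = true ↔ ∃ b ∈ bs, (a - b).natAbs ≤ 5 := by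
  induction bs with
  | nil => simp [pvInnerA]
  | cons b rest ih =>
    simp only [pvInnerA, List.mem_cons]
    split_ifs with h
    · simp only [true_iff]
      exact ⟨b, Or.inl rfl, h⟩
    · rw [ih]
      constructor
      · rintro ⟨x, hx, hle⟩; exact ⟨x, Or.inr hx, hle⟩
      · rintro ⟨x, hx | hx, hle⟩
        · cases hx; exact absurd hle h
        · exact ⟨x, hx, hle⟩

theorem pvOuterA_eq_ite (as bs : List Int) :
    pvOuterA as bs = if as.any (fun a => pvInnerA a bs) then 1 else 0 := by
  induction as with
  | nil => simp [pvOuterA]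
  | cons a rest ih =>
    simp only [pvOuterA, List.any_cons, ih]
    by_cases h : pvInnerA a bs = true <;> simp [h]

theorem pvScanB_eq_ite (sA iB : PySem.Set Int) (l : List (Int × Int)) :
    pvScanB sA iB l =
      if l.any (fun p => PySem.Set.contains sA p.2 &&
          (PySem.List.pyRange (p.1 - 5) (p.1 + 6) 1).any (fun j => PySem.Set.contains iB j))
      then 1 else 0 := by
  induction l with
  | nil => simp [pvScanB]
  | cons p rest ih =>
    simp only [pvScanB, List.any_cons, ih]
    by_cases h : (PySem.Set.contains sA p.2 &&
        (PySem.List.pyRange (p.1 - 5) (p.1 + 6) 1).any (fun j => PySem.Set.contains iB j)) = true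
    · simp only [h]; simp
    · rw [Bool.not_eq_true] at h
      simp only [h, Bool.false_or]
      rfl

theorem pvMem_idxB (resids : List Int) (l : List (Int × Int)) (s0 : PySem.Set Int) (x : Int) :
    x ∈ l.foldl (fun s p => if PySem.Set.contains (PySem.Set.ofList resids) p.2
                            then PySem.Set.add s p.1 else s) s0 ↔
      x ∈ s0 ∨ ∃ p ∈ l, p.2 ∈ resids ∧ x = p.1 := by
  induction l generalizing s0 with
  | nil => simp
  | cons p rest ih =>
    simp only [List.foldl_cons, List.mem_cons, ih]
    split_ifs with h
    · rw [PySem.Set.mem_add]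
      constructor
      · rintro ((hx | hx) | hx)
        · exact Or.inl hx
        · refine Or.inr ⟨p, Or.inl rfl, ?_, hx⟩
          have := h
          simpa [PySem.Set.contains, PySem.Set.mem_ofList] using this
        · rcases hx with ⟨q, hq, hq2, hx⟩; exact Or.inr ⟨q, Or.inr hq, hq2, hx⟩
      · rintro (hx | ⟨q, hq | hq, hq2, hx⟩)
        · exact Or.inl (Or.inl hx)
        · cases hq; exact Or.inl (Or.inr hx)
        · exact Or.inr ⟨q, hq, hq2, hx⟩
    · constructor
      · rintro (hx | ⟨q, hq, hq2, hx⟩)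
        · exact Or.inl hx
        · exact Or.inr ⟨q, Or.inr hq, hq2, hx⟩
      · rintro (hx | ⟨q, hq | hq, hq2, hx⟩)
        · exact Or.inl hx
        · cases hq
          exact absurd (by simpa [PySem.Set.contains, PySem.Set.mem_ofList] using hq2) h
        · exact Or.inr ⟨q, hq, hq2, hx⟩

theorem get_seq_dist_eq_alt (residsA residsB good_resids : List Int) :
    get_seq_dist residsA residsB good_resids = get_seq_dist_alt residsA residsB good_resids := by
  unfold get_seq_dist get_seq_dist_alt
  rw [PySem.List.foldl_append_if, PySem.List.foldl_append_if, pvOuterA_eq_ite, pvScanB_eq_ite]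
  congr 1
  refine propext ?_
  constructor
  · intro h
    rw [List.any_eq_true] at h ⊢
    obtain ⟨a, ha, hinner⟩ := h
    rw [pvInnerA_eq_true_iff] at hinner
    obtain ⟨b, hb, hle⟩ := hinner
    simp only [List.nil_append, List.mem_map, List.mem_filter] at ha hb
    obtain ⟨p, ⟨hp, hpA⟩, rfl⟩ := ha
    obtain ⟨q, ⟨hq, hqB⟩, rfl⟩ := hb
    refine ⟨p, hp, ?_⟩
    rw [Bool.and_eq_true]
    refine ⟨by simpa [PySem.Set.contains, PySem.Set.mem_ofList] using hpA, ?_⟩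
    rw [List.any_eq_true]
    refine ⟨q.1, by rw [PySem.List.mem_pyRange_one]; omega, ?_⟩
    have hmem : q.1 ∈ (PySem.List.enumerate good_resids 0).foldl
        (fun s p => if PySem.Set.contains (PySem.Set.ofList residsB) p.2
                    then PySem.Set.add s p.1 else s) PySem.Set.empty := by
      refine (pvMem_idxB residsB _ _ q.1).mpr (Or.inr ⟨q, hq, ?_, rfl⟩)
      simpa using hqB
    simpa [PySem.Set.contains] using hmem
  · intro h
    rw [List.any_eq_true] at h ⊢
    obtain ⟨p, hp, hcond⟩ := h
    rw [Bool.and_eq_true, List.any_eq_true] at hcond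
    obtain ⟨hpA, j, hj, hjB⟩ := hcond
    rw [PySem.List.mem_pyRange_one] at hj
    have hjmem : j ∈ (PySem.List.enumerate good_resids 0).foldl
        (fun s p => if PySem.Set.contains (PySem.Set.ofList residsB) p.2
                    then PySem.Set.add s p.1 else s) PySem.Set.empty := by
      simpa [PySem.Set.contains] using hjB
    rcases (pvMem_idxB residsB _ _ j).mp hjmem with hbad | ⟨q, hq, hqB, rfl⟩
    · simp [PySem.Set.empty] at hbad
    refine ⟨p.1, ?_, ?_⟩
    · simp only [List.nil_append, List.mem_map, List.mem_filter]
      refine ⟨p, ⟨hp, ?_⟩, rfl⟩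
      simpa [PySem.Set.contains, PySem.Set.mem_ofList] using hpA
    · rw [pvInnerA_eq_true_iff]
      refine ⟨q.1, ?_, by omega⟩
      simp only [List.nil_append, List.mem_map, List.mem_filter]
      exact ⟨q, ⟨hq, by simpa using hqB⟩, rfl⟩

-- ===== VERDICT (by name: the statement is the Claim_ definition above) =====
theorem get_seq_dist_spec : Claim_equal_get_seq_dist := by
  intro residsA residsB good_resids _
  unfold Spec_get_seq_dist
  exact get_seq_dist_eq_alt residsA residsB good_resids
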